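-- pv_equiv track=rewrite | github.com/Kawser-nerd/CLCDSA | Source Codes/CodeJamData/16/12/9.py | solve
-- ===== SOURCE A (Python) =====
-- import collections
--
-- def solve(rows):
--     cnt = collections.Counter()
--     for i in rows:
--         cnt.update(i)
--
--     rst = []
--     for k, v in cnt.items():
--         if v % 2:
--             rst.append(k)
--     return ' '.join(map(str, sorted(rst)))
-- ===== SOURCE B (Python) =====
-- def solve(rows):
--     flat = []
--     for r in rows:
--         flat += r
--     flat.sort()
--
--     out = []
--     i = 0
--     n = len(flat)
--     while i < n:
--         v = flat[i]
--         j = i + 1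
--         while j < n and flat[j] == v:
--             j += 1
--         if (j - i) % 2:
--             out.append(v)
--         i = j
--     return ' '.join(map(str, out))
-- ===== Notes on version B (the rewrite author's own statement) =====
-- stated objective: alternative
-- what changed: Replaces the Counter hash-count plus sort-of-the-odd-keys with flattening everything into one list, sorting it once, and scanning it grouping maximal runs of equal consecutive values, emitting a value when its run length is odd (output order comes from the global sort).
import Mathlib
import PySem

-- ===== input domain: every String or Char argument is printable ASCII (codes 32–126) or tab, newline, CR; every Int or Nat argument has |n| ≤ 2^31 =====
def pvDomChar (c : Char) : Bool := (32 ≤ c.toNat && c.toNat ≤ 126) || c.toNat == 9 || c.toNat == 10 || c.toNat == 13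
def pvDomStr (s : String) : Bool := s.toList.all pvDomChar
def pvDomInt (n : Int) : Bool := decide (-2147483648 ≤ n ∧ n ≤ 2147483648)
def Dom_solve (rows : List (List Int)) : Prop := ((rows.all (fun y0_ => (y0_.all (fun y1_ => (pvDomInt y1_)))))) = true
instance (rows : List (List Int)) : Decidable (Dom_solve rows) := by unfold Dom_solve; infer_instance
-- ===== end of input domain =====

-- B replaces A's Counter-then-sort-the-odd-keys with flatten, one global sort, and a scan
-- grouping maximal runs of equal values, emitting a value when its run length is odd (objective: alternative).

-- ===== PORT A =====
def solve (rows : List (List Int)) : String :=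
  PySem.Str.join " " ((PySem.List.sorted
    ((rows.foldl (fun d i => i.foldl (fun d x => d.modify x 0 (· + 1)) d)
        (PySem.Dict.empty : PySem.Dict Int Int)).items.foldl
      (fun acc kv => if PySem.Int.mod kv.2 2 ≠ 0 then acc ++ [kv.1] else acc) ([] : List Int))
    (fun x => x) false).map PySem.Int.toStr)

-- ===== PORT B =====
-- the while-over-suffix run scan of Source B: recursion on the remaining suffix; takeWhile is the inner while counting the run
def oddRuns (lst : List Int) : List Int :=
  match lst with
  | [] => []
  | v :: t =>
    let run := t.takeWhile (fun x => x == v)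
    let rest := oddRuns (t.drop run.length)
    if (1 + run.length) % 2 = 1 then v :: rest else rest
termination_by lst.length
decreasing_by simp only [List.length_drop, List.length_cons]; omega

def solve_alt (rows : List (List Int)) : String :=
  PySem.Str.join " "
    ((oddRuns (PySem.List.sorted (rows.foldl (fun acc r => acc ++ r) ([] : List Int))
      (fun x => x) false)).map PySem.Int.toStr)

-- ===== PRECONDITION & SPEC =====
def Spec_solve (rows : List (List Int)) (out : String) : Prop := out = solve_alt rows
instance (rows : List (List Int)) (out : String) : Decidable (Spec_solve rows out) := by unfold Spec_solve; infer_instance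

-- ===== CLAIM (what is proved, stated in full; the proofs are below) =====
def Claim_equal_solve : Prop := ∀ (rows : List (List Int)), Dom_solve rows → Spec_solve rows (solve rows)

-- ===== LEMMAS AND PROOFS =====

theorem drop_len_takeWhile (t : List Int) (p : Int → Bool) :
    t.drop (t.takeWhile p).length = t.dropWhile p := by
  induction t with
  | nil => simp
  | cons a t ih => by_cases h : p a <;> simp [h, ih]

theorem oddRuns_subset_n (n : Nat) : ∀ l : List Int, l.length ≤ n → ∀ x ∈ oddRuns l, x ∈ l := by
  induction n with
  | zero =>
    intro l hl x hx
    have : l = [] := List.eq_nil_of_length_eq_zero (Nat.le_zero.mp hl)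
    subst this
    simp [oddRuns] at hx
  | succ n ih =>
    intro l hl x hx
    match l with
    | [] => simp [oddRuns] at hx
    | v :: t =>
      rw [oddRuns] at hx
      have hlen : (t.drop (t.takeWhile (fun x => x == v)).length).length ≤ n := by
        simp only [List.length_cons] at hl
        simp only [List.length_drop]
        omega
      by_cases hb : (1 + (t.takeWhile (fun x => x == v)).length) % 2 = 1
      · rw [if_pos hb] at hx
        rcases List.mem_cons.mp hx with rfl | hx'
        · exact List.mem_cons_self
        · exact List.mem_cons_of_mem _ ((List.drop_sublist _ _).mem (ih _ hlen x hx'))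
      · rw [if_neg hb] at hx
        exact List.mem_cons_of_mem _ ((List.drop_sublist _ _).mem (ih _ hlen x hx))

theorem oddRuns_subset {l : List Int} {x : Int} (h : x ∈ oddRuns l) : x ∈ l :=
  oddRuns_subset_n l.length l le_rfl x h

theorem oddRuns_spec_n (n : Nat) : ∀ s : List Int, s.length ≤ n → s.Pairwise (· ≤ ·) →
    (oddRuns s).Pairwise (· < ·) ∧ ∀ v, (v ∈ oddRuns s ↔ v ∈ s ∧ s.count v % 2 = 1) := by
  induction n with
  | zero =>
    intro s hl _
    have : s = [] := List.eq_nil_of_length_eq_zero (Nat.le_zero.mp hl)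
    subst this
    simp [oddRuns]
  | succ n ih =>
    intro s hl hs
    match s with
    | [] => simp [oddRuns]
    | v :: t =>
      rw [List.pairwise_cons] at hs
      obtain ⟨hv, ht⟩ := hs
      have hdw : t.drop (t.takeWhile (fun x => x == v)).length = t.dropWhile (fun x => x == v) :=
        drop_len_takeWhile t _
      rw [oddRuns, hdw]
      set a := t.takeWhile (fun x => x == v) with ha
      set b := t.dropWhile (fun x => x == v) with hb
      have hsplit : a ++ b = t := List.takeWhile_append_dropWhile
      have hrun : ∀ x ∈ a, x = v := fun x hx =>
        eq_of_beq (List.mem_takeWhile_imp (p := fun x => x == v) hx)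
      have hgt : ∀ x ∈ b, v < x := by
        intro x hx
        cases hc : b with
        | nil => rw [hc] at hx; cases hx
        | cons w u =>
          have hdc : List.dropWhile (fun x => x == v) t = w :: u := by rw [← hb]; exact hc
          have hwv : w ≠ v := by
            have := List.head_dropWhile_not (l := t) (fun x => x == v) (by simp [hdc])
            simpa [hdc] using this
          have hwt : w ∈ t := (List.dropWhile_sublist _).mem (by rw [← hb, hc]; simp)
          have hvw : v < w := lt_of_le_of_ne (hv w hwt) (Ne.symm hwv)
          have hpw : b.Pairwise (· ≤ ·) := ht.sublist (hb ▸ List.dropWhile_sublist _)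
          rw [hc, List.pairwise_cons] at hpw
          rw [hc] at hx
          rcases List.mem_cons.mp hx with rfl | hxu
          · exact hvw
          · exact lt_of_lt_of_le hvw (hpw.1 x hxu)
      have hnotv : v ∉ b := fun h => lt_irrefl v (hgt v h)
      have hlenb : b.length ≤ n := by
        have : a.length + b.length = t.length := by rw [← List.length_append, hsplit]
        simp only [List.length_cons] at hl
        omega
      have hpb : b.Pairwise (· ≤ ·) := ht.sublist (hb ▸ List.dropWhile_sublist _)
      obtain ⟨ihp, ihm⟩ := ih b hlenb hpb
      have hca : a.count v = a.length :=
        List.count_eq_length.mpr (fun x hx => (hrun x hx).symm)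
      have hcb : b.count v = 0 := List.count_eq_zero.mpr hnotv
      have hcv : (v :: t).count v = 1 + a.length := by
        rw [← hsplit]
        simp [List.count_append, hca, hcb]
        omega
      have hcx : ∀ x, x ≠ v → (v :: t).count x = b.count x := by
        intro x hx
        have h1 : a.count x = 0 := List.count_eq_zero.mpr (fun h => hx (hrun x h))
        rw [← hsplit]
        simp [List.count_cons, List.count_append, h1]
        exact fun h => hx h.symm
      have hmemt : ∀ x, x ≠ v → (x ∈ v :: t ↔ x ∈ b) := by
        intro x hx
        rw [← hsplit]
        simp only [List.mem_cons, List.mem_append]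
        constructor
        · rintro (rfl | h | h)
          · exact absurd rfl hx
          · exact absurd (hrun x h) hx
          · exact h
        · intro h; exact Or.inr (Or.inr h)
      constructor
      · -- pairwise <
        split
        · rw [List.pairwise_cons]
          exact ⟨fun x hx => hgt x (oddRuns_subset hx), ihp⟩
        · exact ihp
      · intro x
        by_cases hxv : x = v
        · subst hxv
          have hnot : x ∉ oddRuns b := fun h => hnotv (oddRuns_subset h)
          split
          · rename_i hodd
            constructor
            · intro _
              exact ⟨List.mem_cons_self, by rw [hcv]; omega⟩
            · intro _
              exact List.mem_cons_self
          · rename_i heven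
            constructor
            · intro h
              exact absurd h hnot
            · rintro ⟨_, hcnt⟩
              rw [hcv] at hcnt
              omega
        · have hiff : x ∈ oddRuns b ↔ x ∈ v :: t ∧ (v :: t).count x % 2 = 1 := by
            rw [ihm x, hcx x hxv, hmemt x hxv]
          split
          · constructor
            · intro h
              rcases List.mem_cons.mp h with rfl | h'
              · exact absurd rfl hxv
              · exact hiff.mp h'
            · intro h
              exact List.mem_cons_of_mem _ (hiff.mpr h)
          · exact hiff

theorem oddRuns_spec (s : List Int) (hs : s.Pairwise (· ≤ ·)) :
    (oddRuns s).Pairwise (· < ·) ∧ ∀ v, (v ∈ oddRuns s ↔ v ∈ s ∧ s.count v % 2 = 1) :=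
  oddRuns_spec_n s.length s le_rfl hs

-- ===== VERDICT (by name: the statement is the Claim_ definition above) =====
theorem solve_spec : Claim_equal_solve := by
  intro rows _
  unfold Spec_solve solve solve_alt
  rw [show rows.foldl (fun acc r => acc ++ r) ([] : List Int) = rows.flatten by
    rw [PySem.List.foldl_append_eq_flatten, List.nil_append]]
  rw [show rows.foldl (fun d i => i.foldl (fun d x => d.modify x 0 (· + 1)) d)
      (PySem.Dict.empty : PySem.Dict Int Int) = PySem.Dict.counter rows.flatten by
    rw [PySem.Dict.counter_eq_foldl]; exact Eq.symm List.foldl_flatten]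
  set flat := rows.flatten with hf
  set S := PySem.List.sorted flat (fun x => x) false with hS
  have hsp : S.Pairwise (· ≤ ·) := PySem.List.sorted_pairwise flat (fun x => x)
  obtain ⟨hBlt, hBmem⟩ := oddRuns_spec S hsp
  have hrst : (PySem.Dict.counter flat).items.foldl
      (fun acc kv => if PySem.Int.mod kv.2 2 ≠ 0 then acc ++ [kv.1] else acc) ([] : List Int)
      = (PySem.Set.ofList flat).filter
          (fun k => decide (PySem.Int.mod (flat.count k : Int) 2 ≠ 0)) := by
    rw [PySem.List.foldl_append_ite (p := fun kv : Int × Int => PySem.Int.mod kv.2 2 ≠ 0)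
      (f := fun kv : Int × Int => kv.1), PySem.Dict.items_counter, List.filter_map,
      List.map_map]
    simp [Function.comp_def]
  rw [hrst]
  have hmain : PySem.List.sorted ((PySem.Set.ofList flat).filter
      (fun k => decide (PySem.Int.mod (flat.count k : Int) 2 ≠ 0))) (fun x => x) false
      = oddRuns S := by
    apply PySem.List.sorted_eq_of_perm_of_pairwise_lt
    · have hnodB : (oddRuns S).Nodup := hBlt.imp (fun h => ne_of_lt h)
      have hnodR : ((PySem.Set.ofList flat).filter
          (fun k => decide (PySem.Int.mod (flat.count k : Int) 2 ≠ 0))).Nodup :=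
        (PySem.Set.nodup_ofList flat).filter _
      refine (List.perm_ext_iff_of_nodup hnodB hnodR).mpr ?_
      intro x
      rw [hBmem x, List.mem_filter, PySem.Set.mem_ofList]
      have hmemS : x ∈ S ↔ x ∈ flat := PySem.List.mem_sorted flat (fun x => x) false x
      have hcS : S.count x = flat.count x := (PySem.List.sorted_perm flat (fun x => x) false).count_eq x
      have hmod : PySem.Int.mod ((flat.count x : Nat) : Int) 2 = ((flat.count x % 2 : Nat) : Int) := by
        exact_mod_cast PySem.Int.mod_natCast (flat.count x) 2
      rw [hmemS, hcS]
      constructor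
      · rintro ⟨h1, h2⟩
        refine ⟨h1, ?_⟩
        simp only [hmod, decide_eq_true_eq]
        omega
      · rintro ⟨h1, h2⟩
        simp only [hmod, decide_eq_true_eq] at h2
        refine ⟨h1, ?_⟩
        omega
    · exact hBlt
  rw [hmain]
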